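-- pv_equiv track=rewrite | github.com/akm7289/CTRNN | CTRNNLIB/shuttleDesignTest/test.py | solution
-- ===== SOURCE A (Python) =====
-- import math
-- import math
-- import math
--
-- def solution(A):
--     # Implement your solution here
--     if len(A)<=2:
--         return 0
--     peaks = [0] * len(A)
--     for i in range(1, len(A) - 1):
--         if A[i] > A[i + 1] and A[i] > A[i - 1]:
--             peaks[i] = 1
--     if sum(peaks)<2:
--         return 0
--     num_peaks=min(int(math.sqrt(len(A)) + 1),sum(peaks))
--     for j in range(int(math.sqrt(len(A)) + 1),1, -1):
--         if len(A) % j == 0: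
--             k = 0
--             shift = len(A) // j
--             allHavePeaks = True
--             while k < len(peaks):
--                 if sum(A[k:k + shift]) > 0:
--                     k = k + shift
--                     continue
--                 else:
--                     allHavePeaks = False
--                     break
--             if allHavePeaks:
--                 return shift
--     return len(A)
-- ===== SOURCE B (Python) =====
-- import math
--
-- def solution(A):
--     n = len(A)
--     if n <= 2:
--         return 0
--     npeaks = 0
--     for i in range(1, n - 1):
--         if A[i - 1] < A[i] and A[i] > A[i + 1]:
--             npeaks += 1
--     if npeaks < 2:
--         return 0
--     pre = [0]
--     s = 0
--     for x in A:
--         s += x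
--         pre.append(s)
--     for j in range(math.isqrt(n) + 1, 1, -1):
--         if n % j == 0:
--             shift = n // j
--             if all(pre[k + shift] - pre[k] > 0 for k in range(0, n, shift)):
--                 return shift
--     return n
-- ===== Notes on version B (the rewrite author's own statement) =====
-- stated objective: alternative
-- what changed: B builds a prefix-sum array once and verifies each candidate block size by prefix differences instead of re-summing list slices, and counts peaks directly instead of building and summing a 0/1 flag list.
import Mathlib
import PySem

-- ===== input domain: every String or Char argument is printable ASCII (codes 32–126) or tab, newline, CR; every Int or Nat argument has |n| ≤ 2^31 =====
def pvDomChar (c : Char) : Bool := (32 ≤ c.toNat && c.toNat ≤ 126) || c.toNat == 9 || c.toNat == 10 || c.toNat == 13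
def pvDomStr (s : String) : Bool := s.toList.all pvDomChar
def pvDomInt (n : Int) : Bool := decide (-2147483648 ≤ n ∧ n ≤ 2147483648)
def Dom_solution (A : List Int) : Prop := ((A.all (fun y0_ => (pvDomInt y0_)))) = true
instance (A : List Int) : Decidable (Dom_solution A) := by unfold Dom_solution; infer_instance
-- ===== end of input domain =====

-- B (alternative): a prefix-sum list with block sums taken by prefix differences instead of
-- A's per-candidate slice re-summing, and a direct peak counter instead of A's 0/1 flag list.


-- ===== PORT A =====
-- 'while k < len(peaks): if sum(A[k:k+shift]) > 0: k += shift; continue else: break'.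
-- fuel-guarded recursion: the only call site passes fuel = len(A)+1 and shift ≥ 1, so the
-- fuel-0 branch is unreachable (the guard only makes the recursion total).
def solWhile (A : List Int) (shift : Int) : Nat → Int → Bool
  | 0, _ => true
  | f + 1, k =>
    if k < (A.length : Int) then
      if (PySem.List.slice A (some k) (some (k + shift))).sum > 0 then
        solWhile A shift f (k + shift)
      else false
    else true

-- 'for j in range(int(math.sqrt(len(A))+1), 1, -1): …' with early 'return shift'
def solLoop (A : List Int) : List Int → Int
  | [] => (A.length : Int)
  | j :: js =>
    if PySem.Int.mod (A.length : Int) j = 0 then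
      let shift := PySem.Int.floordiv (A.length : Int) j
      if solWhile A shift (A.length + 1) 0 then shift else solLoop A js
    else solLoop A js

-- int(math.sqrt(n) + 1) is ported as Nat.sqrt n + 1 (exact for every list length < 2^52)
def solution (A : List Int) : Int :=
  if A.length ≤ 2 then 0
  else
    let peaks :=
      (PySem.List.pyRange 1 ((A.length : Int) - 1) 1).foldl
        (fun pk i =>
          if PySem.List.pyGetD A i 0 > PySem.List.pyGetD A (i + 1) 0 ∧
             PySem.List.pyGetD A i 0 > PySem.List.pyGetD A (i - 1) 0 then
            pk.set i.toNat 1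
          else pk)
        (List.replicate A.length (0 : Int))
    if peaks.sum < 2 then 0
    else
      let _num_peaks := min ((Nat.sqrt A.length : Int) + 1) peaks.sum
      solLoop A (PySem.List.pyRange ((Nat.sqrt A.length : Int) + 1) 1 (-1))

-- ===== PORT B =====
-- 'all(pre[k+shift] - pre[k] > 0 for k in range(0, n, shift))' over the prefix-sum list
def altCheck (pre : List Int) (n : Nat) (shift : Int) : Bool :=
  (PySem.List.pyRange 0 (n : Int) shift).all
    (fun k => decide (PySem.List.pyGetD pre (k + shift) 0 - PySem.List.pyGetD pre k 0 > 0))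

def altLoop (pre : List Int) (n : Nat) : List Int → Int
  | [] => (n : Int)
  | j :: js =>
    if PySem.Int.mod (n : Int) j = 0 then
      let shift := PySem.Int.floordiv (n : Int) j
      if altCheck pre n shift then shift else altLoop pre n js
    else altLoop pre n js

-- math.isqrt(n) is Nat.sqrt n
def solution_alt (A : List Int) : Int :=
  let n := A.length
  if n ≤ 2 then 0
  else
    let npeaks :=
      (PySem.List.pyRange 1 ((n : Int) - 1) 1).foldl
        (fun (c : Int) i =>
          if PySem.List.pyGetD A (i - 1) 0 < PySem.List.pyGetD A i 0 ∧
             PySem.List.pyGetD A i 0 > PySem.List.pyGetD A (i + 1) 0 then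
            c + 1
          else c)
        0
    if npeaks < 2 then 0
    else
      let ps := A.foldl (fun (p : List Int × Int) x => (p.1 ++ [p.2 + x], p.2 + x)) ([0], 0)
      altLoop ps.1 n (PySem.List.pyRange ((Nat.sqrt n : Int) + 1) 1 (-1))

-- ===== PRECONDITION & SPEC =====
def Spec_solution (A : List Int) (out : Int) : Prop := out = solution_alt A
instance (A : List Int) (out : Int) : Decidable (Spec_solution A out) := by unfold Spec_solution; infer_instance

-- ===== CLAIM (what is proved, stated in full; the proofs are below) =====
def Claim_equal_solution : Prop := ∀ (A : List Int), Dom_solution A → Spec_solution A (solution A)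

-- ===== LEMMAS AND PROOFS =====

-- prefix sums: preS A m = sum of the first m elements of A
def preS (A : List Int) (m : Nat) : Int := (A.take m).sum

lemma pre_fold_eq (A : List Int) : ∀ (p0 : List Int) (s0 : Int),
    A.foldl (fun (p : List Int × Int) x => (p.1 ++ [p.2 + x], p.2 + x)) (p0, s0)
      = (p0 ++ (List.range A.length).map (fun i => s0 + preS A (i + 1)), s0 + A.sum) := by
  induction A with
  | nil => simp [preS]
  | cons x xs ih =>
    intro p0 s0
    simp only [List.foldl_cons, ih]
    rw [Prod.ext_iff]
    refine ⟨?_, by simp [List.sum_cons]; ring⟩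
    simp only [List.length_cons, List.range_succ_eq_map, List.map_cons, List.map_map]
    rw [List.append_assoc]
    congr 1
    simp only [List.singleton_append, Function.comp_def, Nat.succ_eq_add_one]
    congr 1
    · simp [preS]
    · apply List.map_congr_left; intro i _
      simp [preS, add_assoc]

lemma pre_getD (A : List Int) (m : Nat) (hm : m ≤ A.length) :
    (A.foldl (fun (p : List Int × Int) x => (p.1 ++ [p.2 + x], p.2 + x)) ([0], 0)).1.getD m 0
      = preS A m := by
  rw [pre_fold_eq]
  match m with
  | 0 => simp [preS]
  | m + 1 =>
    simp only [List.singleton_append, List.getD_cons_succ]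
    rw [PySem.List.getD_map_range _ _ _ _ (by omega)]
    simp

lemma sum_drop_take (A : List Int) (a m : Nat) :
    ((A.drop a).take m).sum = preS A (a + m) - preS A a := by
  have h := List.take_add (l := A) (i := a) (j := m)
  have : (A.take (a + m)).sum = (A.take a).sum + ((A.drop a).take m).sum := by
    rw [h, List.sum_append]
  simp [preS]; omega

lemma pyRange_pos_nil (a b s : Int) (hs : 0 < s) (hab : b ≤ a) :
    PySem.List.pyRange a b s = [] := by
  rw [PySem.List.pyRange_of_pos a b hs]
  simp [show ¬ a < b by omega]

lemma pyRange_pos_cons (a b s : Int) (hs : 0 < s) (hab : a < b) :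
    PySem.List.pyRange a b s = a :: PySem.List.pyRange (a + s) b s := by
  rw [PySem.List.pyRange_of_pos a b hs, PySem.List.pyRange_of_pos (a + s) b hs]
  have hq : (b - a + s - 1) / s = (b - (a + s) + s - 1) / s + 1 := by
    have : b - a + s - 1 = (b - (a + s) + s - 1) + 1 * s := by ring
    rw [this, Int.add_mul_ediv_right _ _ (by omega)]
  by_cases h2 : a + s < b
  · have hq0 : 0 ≤ (b - (a + s) + s - 1) / s := by
      apply Int.ediv_nonneg <;> omega
    rw [if_pos hab, if_pos h2, hq]
    rw [show ((b - (a+s) + s - 1)/s + 1).toNat = ((b - (a+s) + s - 1)/s).toNat + 1 by omega]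
    rw [List.range_succ_eq_map]
    simp only [List.map_cons, List.map_map, List.cons.injEq, Function.comp_def, Nat.succ_eq_add_one]
    refine ⟨by ring, List.map_congr_left fun i _ => by push_cast; ring⟩
  · have : (b - (a + s) + s - 1) / s = 0 := by
      apply Int.ediv_eq_zero_of_lt <;> omega
    rw [if_pos hab, if_neg h2, hq, this]
    simp

lemma sum_set_one (l : List Int) (i : Nat) (h : i < l.length) (h0 : l.getD i 0 = 0) :
    (l.set i 1).sum = l.sum + 1 := by
  have h1 := List.sum_set l i (1 : Int)
  have h2 := List.sum_set l i (l[i]'h)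
  simp [List.set_getElem_self] at h2
  simp [List.getD, List.getElem?_eq_getElem h] at h0
  omega

lemma peaks_sum (p : Nat → Prop) [DecidablePred p] :
    ∀ (m off : Nat) (pk : List Int),
      (∀ k, k < m → off + k < pk.length ∧ pk.getD (off + k) 0 = 0) →
      ((List.range m).foldl (fun q k => if p k then q.set (off + k) 1 else q) pk).sum
        = pk.sum + ((List.range m).countP (fun k => decide (p k)) : Int) := by
  intro m
  induction m generalizing p with
  | zero => simp
  | succ m ih =>
    intro off pk hcond
    rw [List.range_succ_eq_map]
    simp only [List.foldl_cons, List.foldl_map, List.countP_cons]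
    have step : (if p 0 then pk.set (off + 0) 1 else pk).sum
        = pk.sum + (if decide (p 0) = true then 1 else 0 : Int) := by
      by_cases h : p 0
      · simp only [if_pos h, decide_eq_true_eq, h, if_true]
        exact sum_set_one _ _ (hcond 0 (by omega)).1 (hcond 0 (by omega)).2
      · simp [h]
    have ihh := ih (fun k => p (k + 1)) (off + 1) (if p 0 then pk.set (off + 0) 1 else pk) ?_
    · have hfun : (fun (q : List Int) k => if p (Nat.succ k) then q.set (off + Nat.succ k) 1 else q)
          = fun q k => if p (k + 1) then q.set ((off + 1) + k) 1 else q := by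
        funext q k
        simp only [Nat.succ_eq_add_one]
        rw [show off + (k + 1) = (off + 1) + k by omega]
      rw [hfun, ihh, step, List.countP_map]
      have hcomp : ((fun k => decide (p k)) ∘ Nat.succ) = fun k => decide (p (k + 1)) := by
        funext k; rfl
      rw [hcomp]
      push_cast
      ring
    · intro k hk
      have hlen : (if p 0 then pk.set (off + 0) 1 else pk).length = pk.length := by
        by_cases h : p 0 <;> simp [h]
      have hl := (hcond (k + 1) (by omega)).1
      have h2 := (hcond (k + 1) (by omega)).2
      refine ⟨by omega, ?_⟩
      by_cases h : p 0
      · simp only [if_pos h]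
        rw [show off + 1 + k = off + (k + 1) by omega]
        rw [List.getD, List.getElem?_set_ne (by omega)]
        exact h2
      · simp only [if_neg h]
        rw [show off + 1 + k = off + (k + 1) by omega]; exact h2

lemma while_eq (A pre : List Int) (shift : Int)
    (hpre : pre = (A.foldl (fun (p : List Int × Int) x => (p.1 ++ [p.2 + x], p.2 + x)) ([0], 0)).1)
    (hs : 0 < shift) :
    ∀ (fuel : Nat) (k : Int), 0 ≤ k → shift ∣ ((A.length : Int) - k) →
      ((A.length : Int) - k).toNat < fuel →
      solWhile A shift fuel k
        = (PySem.List.pyRange k (A.length : Int) shift).all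
            (fun t => decide (PySem.List.pyGetD pre (t + shift) 0 - PySem.List.pyGetD pre t 0 > 0)) := by
  intro fuel
  induction fuel with
  | zero => intro k _ _ h; omega
  | succ f ih =>
    intro k hk hdvd hfuel
    by_cases hlt : k < (A.length : Int)
    · -- k + shift ≤ len
      have hle : k + shift ≤ (A.length : Int) := by
        rcases hdvd with ⟨c, hc⟩
        have hc1 : 1 ≤ c := by nlinarith
        nlinarith
      -- slice sum = prefix difference
      have hval : (PySem.List.slice A (some k) (some (k + shift))).sum
          = PySem.List.pyGetD pre (k + shift) 0 - PySem.List.pyGetD pre k 0 := by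
        rw [PySem.List.slice_toNat A hk (by omega)]
        rw [sum_drop_take]
        rw [hpre, PySem.List.pyGetD_of_nonneg _ _ (by omega),
            PySem.List.pyGetD_of_nonneg _ _ hk]
        rw [pre_getD _ _ (by omega), pre_getD _ _ (by omega)]
        rw [show k.toNat + ((k + shift).toNat - k.toNat) = (k + shift).toNat by omega]
      rw [pyRange_pos_cons k _ shift hs hlt]
      simp only [List.all_cons]
      rw [solWhile]
      rw [if_pos hlt, hval]
      by_cases hpos : PySem.List.pyGetD pre (k + shift) 0 - PySem.List.pyGetD pre k 0 > 0
      · rw [if_pos hpos, ih (k + shift) (by omega) ⟨hdvd.choose - 1, by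
          have := hdvd.choose_spec; ring_nf; ring_nf at this; omega⟩ (by omega)]
        rw [decide_eq_true hpos, Bool.true_and]
      · rw [if_neg hpos, decide_eq_false hpos, Bool.false_and]
    · rw [solWhile, if_neg hlt, pyRange_pos_nil _ _ _ hs (by omega)]
      simp

lemma loop_eq (A pre : List Int)
    (hpre : pre = (A.foldl (fun (p : List Int × Int) x => (p.1 ++ [p.2 + x], p.2 + x)) ([0], 0)).1)
    (hn : 3 ≤ A.length) :
    ∀ (js : List Int), (∀ j ∈ js, 2 ≤ j) → solLoop A js = altLoop pre A.length js := by
  intro js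
  induction js with
  | nil => simp [solLoop, altLoop]
  | cons j js ih =>
    intro hjs
    have hj : 2 ≤ j := hjs j (by simp)
    rw [solLoop, altLoop]
    by_cases hm : PySem.Int.mod (A.length : Int) j = 0
    · rw [if_pos hm, if_pos hm]
      obtain ⟨c, hc⟩ := (PySem.Int.mod_eq_zero_iff_dvd _ _).mp hm
      have hn3 : (3 : Int) ≤ (A.length : Int) := by exact_mod_cast hn
      have hfd : PySem.Int.floordiv (A.length : Int) j = c := by
        rw [PySem.Int.floordiv_eq_ediv_of_pos (by omega), hc,
          Int.mul_ediv_cancel_left _ (by omega)]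
      have hc1 : 1 ≤ c := by nlinarith
      have hw := while_eq A pre c hpre (by omega) (A.length + 1) 0 le_rfl
        ⟨j, by rw [hc]; ring⟩ (by simp)
      have hck : altCheck pre A.length c = solWhile A c (A.length + 1) 0 := by
        rw [altCheck, hw]
      simp only [hfd, hck]
      by_cases hb : solWhile A c (A.length + 1) 0
      · rw [if_pos hb, if_pos hb]
      · rw [if_neg hb, if_neg hb]
        exact ih (fun x hx => hjs x (by simp [hx]))
    · rw [if_neg hm, if_neg hm]
      exact ih (fun x hx => hjs x (by simp [hx]))

lemma peaks_eq_gen (PA PB : Int → Prop) [DecidablePred PA] [DecidablePred PB]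
    (hiff : ∀ i, PA i ↔ PB i) (n : Nat) (hn : 3 ≤ n) :
    ((PySem.List.pyRange 1 ((n : Int) - 1) 1).foldl
        (fun pk i => if PA i then pk.set i.toNat 1 else pk)
        (List.replicate n (0 : Int))).sum
      = (PySem.List.pyRange 1 ((n : Int) - 1) 1).foldl
        (fun (c : Int) i => if PB i then c + 1 else c) 0 := by
  rw [PySem.List.pyRange_one]
  simp only [List.foldl_map]
  have hm : ((n : Int) - 1 - 1).toNat = n - 2 := by omega
  rw [hm]
  have hfunA : (fun (pk : List Int) (k : Nat) => if PA (1 + (k : Int)) then pk.set (1 + (k : Int)).toNat 1 else pk)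
      = fun (pk : List Int) (k : Nat) => if PA (1 + (k : Int)) then pk.set (1 + k) 1 else pk := by
    funext pk k
    rw [show ((1 : Int) + (k : Int)).toNat = 1 + k by omega]
  rw [hfunA]
  rw [peaks_sum (fun k => PA (1 + (k : Int))) (n - 2) 1 (List.replicate n (0 : Int))
    (fun k hk => ⟨by simp; omega, by simp [List.getD]⟩)]
  have hfunB : (fun (c : Int) (k : Nat) => if PB (1 + (k : Int)) then c + 1 else c)
      = fun (c : Int) (k : Nat) => if (fun k => decide (PB (1 + (k : Int)))) k = true then c + 1 else c := by
    funext c k; simp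
  rw [hfunB, PySem.List.foldl_count_if]
  have hrep : (List.replicate n (0 : Int)).sum = 0 := by simp
  rw [hrep, zero_add, zero_add]
  congr 1
  apply List.countP_congr
  intro k _
  simp only [decide_eq_true_eq]
  exact hiff _

-- ===== VERDICT (by name: the statement is the Claim_ definition above) =====
theorem solution_spec : Claim_equal_solution := by
  intro A _
  unfold Spec_solution
  simp only [solution, solution_alt]
  by_cases h2 : A.length ≤ 2
  · simp [h2]
  · have hn : 3 ≤ A.length := by omega
    rw [if_neg h2, if_neg h2]
    rw [peaks_eq_gen _ _ (fun i => and_comm) A.length hn]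
    by_cases hlt :
        (PySem.List.pyRange 1 ((A.length : Int) - 1) 1).foldl
          (fun (c : Int) i =>
            if PySem.List.pyGetD A (i - 1) 0 < PySem.List.pyGetD A i 0 ∧
               PySem.List.pyGetD A i 0 > PySem.List.pyGetD A (i + 1) 0 then
              c + 1
            else c) 0 < 2
    · rw [if_pos hlt, if_pos hlt]
    · rw [if_neg hlt, if_neg hlt]
      apply loop_eq A _ rfl hn
      intro j hj
      have := PySem.List.mem_pyRange_neg_one.mp hj
      omega
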